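-- pv_equiv track=rewrite | github.com/mari3sa/progetto_tesi | backend/app/services/rpq_syntax.py | _kleene_star
-- ===== SOURCE A (Python) =====
-- from typing import List, Tuple
--
-- Atom = Tuple[bool, str]
--
-- def _kleene_star(alts: List[List[Atom]], max_repeat: int = 3) -> List[List[Atom]]:
--     """
--     Kleene star finito:
--      - epsilon
--      - alts
--      - alts.alts
--      - alts.alts.alts
--     fino a max_repeat iterazioni
--     """
--
--     result: List[List[Atom]] = [[]]  # epsilon
--
--     current = alts
--     for _ in range(1, max_repeat + 1):
--         result.extend(current)
--         nxt = []
--         for seq in current: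
--             for a in alts:
--                 nxt.append(seq + a)
--         current = nxt
--
--     return result
-- ===== SOURCE B (Python) =====
-- from itertools import product
-- from typing import List, Tuple
--
-- Atom = Tuple[bool, str]
--
-- def _kleene_star(alts: List[List[Atom]], max_repeat: int = 3) -> List[List[Atom]]:
--     result: List[List[Atom]] = [[]]  # epsilon
--     for i in range(1, max_repeat + 1):
--         for combo in product(alts, repeat=i):
--             result.append([atom for part in combo for atom in part])
--     return result
-- ===== Notes on version B (the rewrite author's own statement) =====
-- stated objective: idiomatic
-- what changed: Each repetition level is generated directly from itertools.product(alts, repeat=i) and flattened, instead of maintaining and extending a running current/nxt level list.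
import Mathlib
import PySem

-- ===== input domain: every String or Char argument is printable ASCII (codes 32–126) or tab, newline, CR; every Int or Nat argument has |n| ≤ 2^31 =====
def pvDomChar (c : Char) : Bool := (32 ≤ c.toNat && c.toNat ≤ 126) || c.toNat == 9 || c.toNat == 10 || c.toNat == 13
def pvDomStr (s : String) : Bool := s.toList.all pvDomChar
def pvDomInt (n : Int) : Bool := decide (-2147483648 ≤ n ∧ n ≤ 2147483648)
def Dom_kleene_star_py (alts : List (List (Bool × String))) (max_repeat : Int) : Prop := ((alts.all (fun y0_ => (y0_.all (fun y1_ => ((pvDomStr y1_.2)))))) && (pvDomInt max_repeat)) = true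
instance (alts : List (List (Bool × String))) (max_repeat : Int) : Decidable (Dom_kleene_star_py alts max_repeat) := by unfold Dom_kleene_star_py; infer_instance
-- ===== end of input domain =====

-- B generates each repetition level directly from the Cartesian product (itertools.product)
-- and flattens it, instead of A's running current/nxt level list; objective: idiomatic, same cost.

-- ===== PORT A =====
def kleene_star_py (alts : List (List (Bool × String))) (max_repeat : Int) : List (List (Bool × String)) :=
  ((PySem.List.pyRange 1 (max_repeat + 1) 1).foldl
    (fun (st : List (List (Bool × String)) × List (List (Bool × String))) _ =>
      let result := st.1 ++ st.2
      let nxt := st.2.foldl (fun nxt seq => alts.foldl (fun nxt a => nxt ++ [seq ++ a]) nxt) []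
      (result, nxt))
    ([[]], alts)).1

-- ===== PORT B =====
-- port of itertools.product(xs, repeat=n): all n-tuples, lexicographic, rightmost fastest
def pyProductRepeat {α : Type} (xs : List α) : Nat → List (List α)
  | 0 => [[]]
  | n + 1 => (pyProductRepeat xs n).flatMap (fun t => xs.map (fun a => t ++ [a]))

def kleene_star_py_alt (alts : List (List (Bool × String))) (max_repeat : Int) : List (List (Bool × String)) :=
  (PySem.List.pyRange 1 (max_repeat + 1) 1).foldl
    (fun result i => result ++ (pyProductRepeat alts i.toNat).map List.flatten) [[]]

-- ===== PRECONDITION & SPEC =====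
def Spec_kleene_star_py (alts : List (List (Bool × String))) (max_repeat : Int) (out : List (List (Bool × String))) : Prop := out = kleene_star_py_alt alts max_repeat
instance (alts : List (List (Bool × String))) (max_repeat : Int) (out : List (List (Bool × String))) : Decidable (Spec_kleene_star_py alts max_repeat out) := by unfold Spec_kleene_star_py; infer_instance

-- ===== CLAIM (what is proved, stated in full; the proofs are below) =====
def Claim_equal_kleene_star_py : Prop := ∀ (alts : List (List (Bool × String))) (max_repeat : Int), Dom_kleene_star_py alts max_repeat → Spec_kleene_star_py alts max_repeat (kleene_star_py alts max_repeat)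

-- ===== LEMMAS AND PROOFS =====

-- level k of B: all flattened k-fold concatenations, in A's generation order
def pvLevel (alts : List (List (Bool × String))) (k : Nat) : List (List (Bool × String)) :=
  (pyProductRepeat alts k).map List.flatten

theorem pvLevel_one (alts : List (List (Bool × String))) : pvLevel alts 1 = alts := by
  simp [pvLevel, pyProductRepeat, Function.comp_def]

theorem pvLevel_succ (alts : List (List (Bool × String))) (k : Nat) :
    pvLevel alts (k + 1) = (pvLevel alts k).flatMap (fun s => alts.map (fun a => s ++ a)) := by
  simp [pvLevel, pyProductRepeat, List.map_flatMap, List.flatMap_map, Function.comp_def]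

-- A's inner double loop builds exactly the next level from the current one
theorem pvNxt_eq (alts cur : List (List (Bool × String))) :
    cur.foldl (fun nxt seq => alts.foldl (fun nxt a => nxt ++ [seq ++ a]) nxt) [] =
      cur.flatMap (fun s => alts.map (fun a => s ++ a)) := by
  have h : ∀ (s : List (Bool × String)) (acc : List (List (Bool × String))),
      alts.foldl (fun nxt a => nxt ++ [s ++ a]) acc = acc ++ alts.map (fun a => s ++ a) :=
    fun s acc => PySem.List.foldl_append_singleton_eq_map (fun a => s ++ a) alts acc
  calc cur.foldl (fun nxt seq => alts.foldl (fun nxt a => nxt ++ [seq ++ a]) nxt) []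
      = cur.foldl (fun nxt seq => nxt ++ alts.map (fun a => seq ++ a)) [] := by
        induction cur using List.reverseRecOn with
        | nil => rfl
        | append_singleton xs x ihc => simp [List.foldl_append, h]
    _ = cur.flatMap (fun s => alts.map (fun a => s ++ a)) := by
        simpa using PySem.List.foldl_append_eq_flatMap (fun s => alts.map (fun a => s ++ a)) cur []

-- main invariant: running A's loop over range(a, a+n) starting at level a appends levels a..a+n-1
theorem pvMain (alts : List (List (Bool × String))) (n : Nat) :
    ∀ (a : Int) (res : List (List (Bool × String))), 0 < a →
    ((PySem.List.pyRange a (a + n) 1).foldl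
      (fun (st : List (List (Bool × String)) × List (List (Bool × String))) _ =>
        let result := st.1 ++ st.2
        let nxt := st.2.foldl (fun nxt seq => alts.foldl (fun nxt a => nxt ++ [seq ++ a]) nxt) []
        (result, nxt))
      (res, pvLevel alts a.toNat)).1
    = res ++ (PySem.List.pyRange a (a + n) 1).flatMap (fun i => pvLevel alts i.toNat) := by
  induction n with
  | zero =>
    intro a res _
    rw [PySem.List.pyRange_one_eq_nil (by omega)]
    simp
  | succ n ih =>
    intro a res ha
    rw [PySem.List.pyRange_one_cons (by omega : a < a + (n + 1 : Nat))]
    simp only [List.foldl_cons, List.flatMap_cons]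
    rw [pvNxt_eq]
    have hnext : (pvLevel alts a.toNat).flatMap (fun s => alts.map (fun x => s ++ x))
        = pvLevel alts (a + 1).toNat := by
      rw [← pvLevel_succ]
      congr 1
      omega
    have harg : a + 1 + (n : Int) = a + ((n : Nat) + 1 : Nat) := by push_cast; ring
    have := ih (a + 1) (res ++ pvLevel alts a.toNat) (by omega)
    rw [harg] at this
    simp only [hnext] at *
    rw [this, List.append_assoc]

theorem pvAltFold (alts : List (List (Bool × String))) (mr : Int) :
    kleene_star_py_alt alts mr
      = [[]] ++ (PySem.List.pyRange 1 (mr + 1) 1).flatMap (fun i => pvLevel alts i.toNat) := by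
  unfold kleene_star_py_alt
  simpa [pvLevel] using PySem.List.foldl_append_eq_flatMap
    (fun i : Int => (pyProductRepeat alts i.toNat).map List.flatten) (PySem.List.pyRange 1 (mr + 1) 1) [[]]

-- ===== VERDICT (by name: the statement is the Claim_ definition above) =====
theorem kleene_star_py_spec : Claim_equal_kleene_star_py := by
  intro alts mr _
  unfold Spec_kleene_star_py kleene_star_py
  rw [pvAltFold]
  by_cases h : mr ≤ 0
  · rw [PySem.List.pyRange_one_eq_nil (by omega)]
    simp
  · have h1 : (1 : Int) + mr.toNat = mr + 1 := by omega
    have := pvMain alts mr.toNat 1 [[]] (by omega)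
    rw [h1] at this
    rw [show pvLevel alts (1 : Int).toNat = alts from pvLevel_one alts] at this
    rw [this]
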